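-- pv_equiv track=rewrite | github.com/WolfgangSteiner/algorithms | assignment_2_1/scc.py | dfs_b
-- ===== SOURCE A (Python) =====
-- def dfs_b(adjacency_list, leader, visited_nodes):
--     stack = [leader]
--     while len(stack):
--         v = stack.pop(-1)
--         if v in visited_nodes:
--             continue
--         stack.extend(adjacency_list[v])
--         visited_nodes[v] = leader
--
--     return visited_nodes
-- ===== SOURCE B (Python) =====
-- def dfs_b(adjacency_list, leader, visited_nodes):
--     # Recursive DFS instead of an explicit stack; visiting neighbours in
--     # reversed order reproduces the pop-from-the-end visit order of the
--     # iterative version exactly (same dict insertion order).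
--     def dfs(v):
--         if v in visited_nodes:
--             return
--         visited_nodes[v] = leader
--         for w in reversed(adjacency_list[v]):
--             dfs(w)
--     dfs(leader)
--     return visited_nodes
-- ===== Notes on version B (the rewrite author's own statement) =====
-- stated objective: alternative
-- what changed: Replaces the explicit-stack while-loop with a recursive DFS helper (visiting neighbour lists in reversed order, which yields the identical visit and dict-insertion order).
-- outside the precondition, e.g. on dfs_b({0: [], 1: [7]}, 0, {}): A returns {0: 0}, B returns {0: 0}
import Mathlib
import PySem

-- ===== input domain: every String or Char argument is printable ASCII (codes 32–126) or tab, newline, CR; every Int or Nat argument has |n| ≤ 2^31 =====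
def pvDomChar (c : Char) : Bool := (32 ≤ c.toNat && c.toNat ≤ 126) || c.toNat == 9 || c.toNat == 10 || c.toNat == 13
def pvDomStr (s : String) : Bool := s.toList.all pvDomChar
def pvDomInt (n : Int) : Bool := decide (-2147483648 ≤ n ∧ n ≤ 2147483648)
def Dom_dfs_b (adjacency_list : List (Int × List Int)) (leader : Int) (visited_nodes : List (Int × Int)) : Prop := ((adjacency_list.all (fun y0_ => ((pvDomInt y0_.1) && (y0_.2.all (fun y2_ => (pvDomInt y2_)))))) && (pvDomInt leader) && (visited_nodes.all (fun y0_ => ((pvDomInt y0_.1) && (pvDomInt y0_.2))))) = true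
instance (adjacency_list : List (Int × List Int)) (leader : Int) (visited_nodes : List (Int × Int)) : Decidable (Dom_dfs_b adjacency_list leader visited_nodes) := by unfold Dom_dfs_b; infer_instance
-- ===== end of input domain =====

-- B replaces the explicit-stack loop by recursive DFS (over reversed neighbour
-- lists, which gives the identical visit/insertion order); equivalence is about
-- the RETURN value only — both Pythons also mutate visited_nodes in place.

-- fuel bound used by both ports (total number of listed neighbours + 1);
-- under Pre_ it is proved sufficient, so the fuel guard never fires there
def pvTotal (adjacency_list : List (Int × List Int)) : Nat :=
  (adjacency_list.map (fun p => p.2.length)).sum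

-- ===== PORT A =====
-- the while-loop over the explicit stack; pop(-1) = take the last element
def dfsLoopA (adjacency_list : List (Int × List Int)) (leader : Int) :
    Nat → List Int → PySem.Dict Int Int → PySem.Dict Int Int
  | _, [], vis => vis
  | 0, _ :: _, vis => vis            -- fuel guard only; unreachable under Pre_
  | f + 1, s :: t, vis =>
    let v := (s :: t).getLast (by simp)      -- v = stack.pop(-1)
    let rest := (s :: t).dropLast
    if vis.contains v then dfsLoopA adjacency_list leader f rest vis   -- continue
    else
      match (PySem.Dict.mk adjacency_list).get? v with
      | none => vis                  -- adjacency_list[v]: KeyError, excluded by Pre_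
      | some ns =>                   -- stack.extend(...); visited_nodes[v] = leader
        dfsLoopA adjacency_list leader f (rest ++ ns) (vis.insert v leader)

def dfs_b (adjacency_list : List (Int × List Int)) (leader : Int) (visited_nodes : List (Int × Int)) : List (Int × Int) :=
  (dfsLoopA adjacency_list leader (pvTotal adjacency_list + 1) [leader] (PySem.Dict.mk visited_nodes)).items

-- termination helper for the fuel-capped recursion of port B (cited by its decreasing_by)
theorem pvLexMin (a f n m : Nat) (h : n < m) : Prod.Lex (· < ·) (· < ·) (min a f, n) (f, m) := by
  rcases Nat.lt_or_ge (min a f) f with h' | h'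
  · exact Prod.Lex.left _ _ h'
  · have hm : min a f = f := by omega
    rw [hm]; exact Prod.Lex.right _ h

-- ===== PORT B =====
-- recursive DFS: dfsPB is the inner 'def dfs(v)', dfsLB the 'for w in reversed(...)'
-- loop; fuel (one unit per dfs call) is a totality guard only, with the remaining
-- fuel threaded through the loop ('min' caps it for termination; proved exact under Pre_)
mutual
def dfsPB (adjacency_list : List (Int × List Int)) (leader : Int) :
    Nat → PySem.Dict Int Int → Int → Nat × PySem.Dict Int Int
  | 0, vis, _ => (0, vis)            -- fuel guard only; unreachable under Pre_
  | f + 1, vis, v =>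
    if vis.contains v then (f, vis)  -- return
    else
      let vis' := vis.insert v leader            -- visited_nodes[v] = leader
      match (PySem.Dict.mk adjacency_list).get? v with
      | none => (f, vis')            -- adjacency_list[v]: KeyError, excluded by Pre_
      | some ns => dfsLB adjacency_list leader f vis' ns.reverse   -- for w in reversed(...): dfs(w)
termination_by f _ _ => (f, 0)
decreasing_by exact Prod.Lex.left _ _ (Nat.lt_succ_self _)

def dfsLB (adjacency_list : List (Int × List Int)) (leader : Int) :
    Nat → PySem.Dict Int Int → List Int → Nat × PySem.Dict Int Int
  | f, vis, [] => (f, vis)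
  | f, vis, w :: ws =>
    let r := dfsPB adjacency_list leader f vis w
    dfsLB adjacency_list leader (min r.1 f) r.2 ws
termination_by f _ ws => (f, ws.length + 1)
decreasing_by
  · exact Prod.Lex.right _ (by simp)
  · exact pvLexMin _ _ _ _ (by simp)
end

def dfs_b_alt (adjacency_list : List (Int × List Int)) (leader : Int) (visited_nodes : List (Int × Int)) : List (Int × Int) :=
  ((dfsPB adjacency_list leader (pvTotal adjacency_list + 1) (PySem.Dict.mk visited_nodes) leader).2).items

-- ===== PRECONDITION & SPEC =====
-- Pre_ excludes the inputs where the Python raises KeyError (a node to expand has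
-- no adjacency entry).  It is mildly NARROWER than "A returns": it demands every
-- LISTED neighbour be resolvable (unless the leader is already visited), whereas
-- A also returns when the only unresolvable neighbours are unreachable from the
-- leader — reachability is not a closed-form condition, this is.
def Pre_dfs_b (adjacency_list : List (Int × List Int)) (leader : Int) (visited_nodes : List (Int × Int)) : Prop :=
  (PySem.Dict.mk visited_nodes).contains leader = true ∨
  ((PySem.Dict.mk adjacency_list).contains leader = true ∧
    ∀ p ∈ adjacency_list, ∀ w ∈ p.2,
      (PySem.Dict.mk adjacency_list).contains w = true ∨ (PySem.Dict.mk visited_nodes).contains w = true)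
instance (adjacency_list : List (Int × List Int)) (leader : Int) (visited_nodes : List (Int × Int)) : Decidable (Pre_dfs_b adjacency_list leader visited_nodes) := by unfold Pre_dfs_b; infer_instance

def pvWitness_dfs_b : (List (Int × List Int)) × Int × (List (Int × Int)) :=
  ([(0, [1, 2]), (1, [0]), (2, [2, 1])], 0, [(5, 5)])

def Spec_dfs_b (adjacency_list : List (Int × List Int)) (leader : Int) (visited_nodes : List (Int × Int)) (out : List (Int × Int)) : Prop := out = dfs_b_alt adjacency_list leader visited_nodes
instance (adjacency_list : List (Int × List Int)) (leader : Int) (visited_nodes : List (Int × Int)) (out : List (Int × Int)) : Decidable (Spec_dfs_b adjacency_list leader visited_nodes out) := by unfold Spec_dfs_b; infer_instance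

-- ===== CLAIM (what is proved, stated in full; the proofs are below) =====
def Claim_equal_dfs_b : Prop := ∀ (adjacency_list : List (Int × List Int)) (leader : Int) (visited_nodes : List (Int × Int)), Dom_dfs_b adjacency_list leader visited_nodes → Pre_dfs_b adjacency_list leader visited_nodes → Spec_dfs_b adjacency_list leader visited_nodes (dfs_b adjacency_list leader visited_nodes)

-- ===== LEMMAS AND PROOFS =====

-- proof-side helper quantities
def pvNodes (adjacency_list : List (Int × List Int)) (leader : Int) : List Int :=
  leader :: adjacency_list.flatMap (fun p => p.2)

def pvUnvis (adjacency_list : List (Int × List Int)) (leader : Int) (vis : PySem.Dict Int Int) : Nat :=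
  ((pvNodes adjacency_list leader).filter (fun x => !(vis.contains x))).length

def pvSumU (adjacency_list : List (Int × List Int)) (vis : PySem.Dict Int Int) : Nat :=
  ((adjacency_list.filter (fun p => !(vis.contains p.1))).map (fun p => p.2.length)).sum

theorem dfsLB_append (adj : List (Int × List Int)) (leader : Int) (l1 l2 : List Int) (f : Nat) (vis : PySem.Dict Int Int) :
    dfsLB adj leader f vis (l1 ++ l2)
      = dfsLB adj leader (dfsLB adj leader f vis l1).1 (dfsLB adj leader f vis l1).2 l2 := by
  induction l1 generalizing f vis with
  | nil => simp [dfsLB]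
  | cons w ws ih => simp only [List.cons_append, dfsLB]; exact ih _ _

theorem dfsLB_fuel_le (adj : List (Int × List Int)) (leader : Int) (ws : List Int) (f : Nat) (vis : PySem.Dict Int Int) :
    (dfsLB adj leader f vis ws).1 ≤ f := by
  induction ws generalizing f vis with
  | nil => simp [dfsLB]
  | cons w ws ih =>
    simp only [dfsLB]
    exact le_trans (ih _ _) (Nat.min_le_right _ _)

theorem mem_of_get?_mk (adj : List (Int × List Int)) (v : Int) (ns : List Int)
    (h : (PySem.Dict.mk adj).get? v = some ns) :
    ∀ w ∈ ns, w ∈ adj.flatMap (fun p => p.2) := by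
  induction adj with
  | nil => simp [PySem.Dict.get?] at h
  | cons p rest ih =>
    rcases p with ⟨k, vs⟩
    rw [PySem.Dict.get?_mk_cons] at h
    by_cases hk : k == v
    · simp [hk] at h; intro w hw; subst h; simp; exact Or.inl hw
    · simp [hk] at h
      intro w hw
      simp only [List.flatMap_cons, List.mem_append]
      exact Or.inr (ih h w hw)

theorem len_le_total (adj : List (Int × List Int)) (v : Int) (ns : List Int)
    (h : (PySem.Dict.mk adj).get? v = some ns) : ns.length ≤ pvTotal adj := by
  induction adj with
  | nil => simp [PySem.Dict.get?] at h
  | cons p rest ih =>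
    rcases p with ⟨k, vs⟩
    rw [PySem.Dict.get?_mk_cons] at h
    by_cases hk : k == v
    · simp [hk] at h; subst h; simp [pvTotal]
    · simp [hk] at h
      have := ih h
      simp [pvTotal] at this ⊢
      omega

theorem filter_len_le {p q : Int → Bool} (l : List Int) (h : ∀ x ∈ l, p x = true → q x = true) :
    (l.filter p).length ≤ (l.filter q).length := by
  induction l with
  | nil => simp
  | cons x xs ih =>
    have ih' := ih (fun y hy => h y (List.mem_cons_of_mem _ hy))
    by_cases hp : p x = true
    · have hq := h x (List.mem_cons_self) hp
      simp [hp, hq]; omega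
    · simp only [Bool.not_eq_true] at hp
      by_cases hq : q x = true <;> simp [hp, hq] <;> omega

theorem filter_len_lt {p q : Int → Bool} (l : List Int) (v : Int) (hv : v ∈ l)
    (hqv : q v = true) (hpv : p v = false) (h : ∀ x ∈ l, p x = true → q x = true) :
    (l.filter p).length < (l.filter q).length := by
  induction l with
  | nil => simp at hv
  | cons x xs ih =>
    have hle := filter_len_le xs (fun y hy => h y (List.mem_cons_of_mem _ hy))
    rcases List.mem_cons.mp hv with rfl | hv'
    · simp [hpv, hqv]; omega
    · have ih' := ih hv' (fun y hy => h y (List.mem_cons_of_mem _ hy))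
      by_cases hp : p x = true
      · have hq := h x (List.mem_cons_self) hp
        simp [hp, hq]; omega
      · simp only [Bool.not_eq_true] at hp
        by_cases hq : q x = true <;> simp [hp, hq] <;> omega

theorem unvis_insert_lt (adj : List (Int × List Int)) (leader v w : Int)
    (vis : PySem.Dict Int Int) (hv : v ∈ pvNodes adj leader) (hc : vis.contains v = false) :
    pvUnvis adj leader (vis.insert v w) < pvUnvis adj leader vis := by
  apply filter_len_lt _ v hv
  · simp [hc]
  · simp
  · intro x _ hx
    simp [PySem.Dict.contains_insert] at hx ⊢
    exact hx.2

theorem sum_filter_mono {p q : (Int × List Int) → Bool} (l : List (Int × List Int))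
    (h : ∀ x ∈ l, p x = true → q x = true) :
    ((l.filter p).map (fun r => r.2.length)).sum ≤ ((l.filter q).map (fun r => r.2.length)).sum := by
  induction l with
  | nil => simp
  | cons x xs ih =>
    have ih' := ih (fun y hy => h y (List.mem_cons_of_mem _ hy))
    by_cases hp : p x = true
    · have hq := h x (List.mem_cons_self) hp
      simp [hp, hq]; omega
    · simp only [Bool.not_eq_true] at hp
      by_cases hq : q x = true <;> simp [hp, hq] <;> omega

theorem sumU_le_total (adj : List (Int × List Int)) (vis : PySem.Dict Int Int) :
    pvSumU adj vis ≤ pvTotal adj := by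
  induction adj with
  | nil => simp [pvSumU, pvTotal]
  | cons x xs ih =>
    by_cases hc : vis.contains x.1 = true <;>
      simp [pvSumU, pvTotal, hc] at ih ⊢ <;> omega

theorem sumU_insert (adj : List (Int × List Int)) (v w : Int) (ns : List Int)
    (vis : PySem.Dict Int Int) (hc : vis.contains v = false)
    (h : (PySem.Dict.mk adj).get? v = some ns) :
    pvSumU adj (vis.insert v w) + ns.length ≤ pvSumU adj vis := by
  induction adj with
  | nil => simp [PySem.Dict.get?] at h
  | cons p rest ih =>
    rcases p with ⟨k, vs⟩
    rw [PySem.Dict.get?_mk_cons] at h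
    have hmono : pvSumU rest (vis.insert v w) ≤ pvSumU rest vis := by
      apply sum_filter_mono
      intro x _ hx
      simp only [PySem.Dict.contains_insert, Bool.not_eq_eq_eq_not, Bool.not_true,
        Bool.or_eq_false_iff] at hx
      simp [hx.2]
    by_cases hk : k == v
    · simp only [hk, if_pos] at h
      have hkv : k = v := by simpa using hk
      injection h with h; subst h; subst hkv
      simp [pvSumU, hc, PySem.Dict.contains_insert]
      have h2 : pvSumU rest (vis.insert k w) ≤ pvSumU rest vis := hmono
      simp [pvSumU, PySem.Dict.contains_insert] at h2
      omega
    · simp [hk] at h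
      have ih' := ih h
      have hkv : ¬ k = v := by simpa using hk
      have hkb : (k == v) = false := by simp [hkv]
      by_cases hck : vis.contains k = true
      · simp [pvSumU, hck, PySem.Dict.contains_insert, hkb] at ih' ⊢
        omega
      · simp only [Bool.not_eq_true] at hck
        simp [pvSumU, hck, PySem.Dict.contains_insert, hkb] at ih' ⊢
        omega

-- the central lemma: the stack loop of A equals B's recursive descent on the
-- reversed stack, given enough fuel and resolvable keys
theorem pvMain (N : Nat) :
    ∀ (adj : List (Int × List Int)) (leader : Int) (vis : PySem.Dict Int Int) (stack : List Int) (f : Nat),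
    pvUnvis adj leader vis * (pvTotal adj + 1) + stack.length ≤ N →
    (∀ x ∈ stack, x ∈ pvNodes adj leader) →
    (∀ x ∈ pvNodes adj leader, (PySem.Dict.mk adj).contains x = true ∨ vis.contains x = true) →
    stack.length + pvSumU adj vis ≤ f →
    dfsLoopA adj leader f stack vis = (dfsLB adj leader f vis stack.reverse).2 := by
  induction N using Nat.strong_induction_on with
  | _ N IH =>
  intro adj leader vis stack f hN hmem hkey hf
  rcases stack with _ | ⟨s, t⟩
  · simp [dfsLoopA, dfsLB]
  rcases f with _ | f
  · simp at hf
  have hne : (s :: t) ≠ [] := by simp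
  set v := (s :: t).getLast hne with hv
  set rest := (s :: t).dropLast with hrest
  have hrev : (s :: t).reverse = v :: rest.reverse := by
    conv_lhs => rw [← List.dropLast_append_getLast hne]
    rw [List.reverse_append]; simp
    exact ⟨rfl, rfl⟩
  have hvmem : v ∈ pvNodes adj leader := hmem v (List.getLast_mem hne)
  have hrestmem : ∀ x ∈ rest, x ∈ pvNodes adj leader :=
    fun x hx => hmem x ((List.dropLast_sublist _).mem hx)
  have hrestlen : rest.length = t.length := by simp [hrest]
  rw [hrev]
  by_cases hc : vis.contains v = true
  · -- already visited: pop and skip / immediate return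
    have hA : dfsLoopA adj leader (f + 1) (s :: t) vis = dfsLoopA adj leader f rest vis := by
      simp only [dfsLoopA]; rw [if_pos hc]
    have hB : dfsLB adj leader (f + 1) vis (v :: rest.reverse)
        = dfsLB adj leader f vis rest.reverse := by
      simp only [dfsLB, dfsPB]; rw [if_pos hc]; simp
    rw [hA, hB]
    have hlt : pvUnvis adj leader vis * (pvTotal adj + 1) + rest.length < N := by
      simp only [List.length_cons] at hN; omega
    exact IH _ hlt adj leader vis rest f (le_refl _) hrestmem hkey
      (by simp only [List.length_cons] at hf; omega)
  · -- unvisited: expand v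
    have hc' : vis.contains v = false := by simp [hc]
    have hsome : ∃ ns, (PySem.Dict.mk adj).get? v = some ns := by
      rcases hkey v hvmem with hk | hk
      · rw [PySem.Dict.contains_eq_isSome_get?] at hk
        exact Option.isSome_iff_exists.mp hk
      · rw [hk] at hc; exact absurd rfl hc
    obtain ⟨ns, hns⟩ := hsome
    set vis' := vis.insert v leader with hvis'
    have hA : dfsLoopA adj leader (f + 1) (s :: t) vis
        = dfsLoopA adj leader f (rest ++ ns) vis' := by
      simp only [dfsLoopA]; rw [if_neg hc, hns]
    have hB : dfsLB adj leader (f + 1) vis (v :: rest.reverse)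
        = dfsLB adj leader (min (dfsLB adj leader f vis' ns.reverse).1 (f + 1))
            (dfsLB adj leader f vis' ns.reverse).2 rest.reverse := by
      simp only [dfsLB, dfsPB]; rw [if_neg hc, hns]
    -- measure decrease
    have hu : pvUnvis adj leader vis' < pvUnvis adj leader vis :=
      unvis_insert_lt adj leader v leader vis hvmem hc'
    have hnsT : ns.length ≤ pvTotal adj := len_le_total adj v ns hns
    have hmul : (pvUnvis adj leader vis' + 1) * (pvTotal adj + 1)
        ≤ pvUnvis adj leader vis * (pvTotal adj + 1) :=
      Nat.mul_le_mul_right _ hu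
    rw [Nat.add_mul, Nat.one_mul] at hmul
    have hlt : pvUnvis adj leader vis' * (pvTotal adj + 1) + (rest ++ ns).length < N := by
      simp only [List.length_append, List.length_cons] at hN ⊢; omega
    -- fuel bound for the recursive call
    have hsum : pvSumU adj vis' + ns.length ≤ pvSumU adj vis :=
      sumU_insert adj v leader ns vis hc' hns
    have hfuel : (rest ++ ns).length + pvSumU adj vis' ≤ f := by
      simp only [List.length_append, List.length_cons] at hf ⊢; omega
    have hmem' : ∀ x ∈ rest ++ ns, x ∈ pvNodes adj leader := by
      intro x hx
      rcases List.mem_append.mp hx with hx | hx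
      · exact hrestmem x hx
      · exact List.mem_cons_of_mem _ (mem_of_get?_mk adj v ns hns x hx)
    have hkey' : ∀ x ∈ pvNodes adj leader,
        (PySem.Dict.mk adj).contains x = true ∨ vis'.contains x = true := by
      intro x hx
      rcases hkey x hx with hk | hk
      · exact Or.inl hk
      · right; rw [PySem.Dict.contains_insert, hk]; simp
    have hIH := IH _ hlt adj leader vis' (rest ++ ns) f (le_refl _) hmem' hkey' hfuel
    rw [hA, hB, hIH, List.reverse_append, dfsLB_append]
    have hmin : min (dfsLB adj leader f vis' ns.reverse).1 (f + 1)
        = (dfsLB adj leader f vis' ns.reverse).1 :=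
      Nat.min_eq_left (le_trans (dfsLB_fuel_le adj leader ns.reverse f vis') (Nat.le_succ f))
    rw [hmin]

theorem dfs_b_spec : Claim_equal_dfs_b := by
  intro adj leader vis _hDom hPre
  unfold Spec_dfs_b dfs_b dfs_b_alt
  rcases hPre with hl | ⟨hl, hcl⟩
  · -- leader already visited: both return the input dict at once
    simp [dfsLoopA, dfsPB, hl]
  · have hkey : ∀ x ∈ pvNodes adj leader,
        (PySem.Dict.mk adj).contains x = true ∨ (PySem.Dict.mk vis).contains x = true := by
      intro x hx
      rcases List.mem_cons.mp hx with rfl | hx'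
      · exact Or.inl hl
      · obtain ⟨p, hp, hxp⟩ := List.mem_flatMap.mp hx'
        exact hcl p hp x hxp
    have hmain := pvMain (pvUnvis adj leader (PySem.Dict.mk vis) * (pvTotal adj + 1) + 1)
      adj leader (PySem.Dict.mk vis) [leader] (pvTotal adj + 1) (le_refl _)
      (by intro x hx; simp only [List.mem_singleton] at hx; subst hx; exact List.mem_cons_self)
      hkey (by have := sumU_le_total adj (PySem.Dict.mk vis); simp; omega)
    rw [hmain]
    simp [dfsLB]
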